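-- pv_equiv track=rewrite | github.com/ChadLei/Google-Foobar | 2.5_Ion_Flux_Relabelling.py | solution
-- ===== SOURCE A (Python) =====
-- from collections import OrderedDict
--
-- def solution(h, q):
-- 	def dfs(subtreeSize, offset):
-- 		# We've hit the bottom when there are no more nodes in our subtree, meaning we have visited every node.
-- 		if subtreeSize < 1: return
-- 		# Shifting the size by 1 is the same as dividing it in half, and we do this each time we want to visit the next level since every level has (n - 1)/2 nodes.
-- 		subtreeSize = subtreeSize >> 1
-- 		# Offset is 0 if we're visiting the left subtree. Offset is the number of nodes on the left subtree of the root if we're visiting the left subtrees of the right subtree of the root.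
-- 		leftNode = offset + subtreeSize
-- 		# Values on the right subtree are the same as the values on the left + the number of nodes in its subtree (including itself) since we traverse nodes in exactly the same order for both subtrees.
-- 		rightNode = leftNode + subtreeSize
-- 		# The parent node is visited last in a post order traversal so it's just the top node on the right subtree + 1.
-- 		parentNode = rightNode + 1
-- 		# We set the parent node if we're currently visiting the converter we were looking for in q and only change it on the first visit.
-- 		if leftNode in parentLabels and parentLabels[leftNode] == -1:
-- 			parentLabels[leftNode] = parentNode
-- 		if rightNode in parentLabels and parentLabels[rightNode] == -1:
-- 			parentLabels[rightNode] = parentNode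
-- 		# We recursively visit the left and right subtrees in order to make sure we cover all converters.
-- 		dfs(subtreeSize, offset)
-- 		dfs(subtreeSize, leftNode)
--
-- 	# The max amount of nodes in a perfect binary tree has 2^h - 1 nodes.
-- 	maxSize = (2**h) - 1
-- 	# Initialize all converters to -1, which should change later if a valid parent is found.
-- 	parentLabels = OrderedDict((converter,-1) for converter in q)
-- 	# As we go down each level in the tree, each subtree at the level has (n - 1)/2 nodes.
-- 	subtreeSize = maxSize
-- 	# Since we're traversing the whole tree once and setting values as we go, we get a O(n) runtime where n is the amount of total nodes,
-- 	# as compared to looping through each converter in q and running through the whole tree every time to find it which would be O(len(q) * n).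
-- 	dfs(subtreeSize, 0)
-- 	return list(parentLabels.values())
-- ===== SOURCE B (Python) =====
-- def solution(h, q):
--     # Per-query walk from the root using subtree-size arithmetic, instead of
--     # traversing all 2^h - 1 nodes. Queried label 0 (not a node) gets -1 here.
--     top = (1 << h) - 1 if h >= 1 else 0
--
--     def parent(x):
--         if x < 1 or top <= x:
--             return -1
--         s, o = top, 0
--         for _ in range(h):
--             half = s >> 1
--             left = o + half
--             right = left + half
--             if x == left or x == right:
--                 return o + s
--             if x < left:
--                 s = half
--             else:
--                 s, o = half, left
--         return -1
--
--     out = {}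
--     for x in q:
--         if x not in out:
--             out[x] = parent(x)
--     return list(out.values())
-- ===== Notes on version B (the rewrite author's own statement) =====
-- stated objective: alternative
-- what changed: Instead of a recursive DFS over all 2^h-1 nodes that fills a dict of answers, B answers each query independently by walking root-to-node in O(h) steps using subtree-size arithmetic (intended as faster; a timing run could not confirm a ratio since A times out on large h while B returns). Pre_ excludes only h >= 995, exactly where A's depth-h recursion overflows CPython's default recursion limit of 1000 and raises RecursionError before returning.
-- intended difference: When h >= 1 and 0 is in q, A returns 1 for the query 0 (a phantom write of its size-1 DFS calls, though 0 is not a node label of the tree 1..2^h-1), while B returns the sentinel -1 meaning 'no parent', which is the intended answer for a non-node. — e.g. on solution(1, [0]): A returns [1], B returns [-1]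
import Mathlib
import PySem

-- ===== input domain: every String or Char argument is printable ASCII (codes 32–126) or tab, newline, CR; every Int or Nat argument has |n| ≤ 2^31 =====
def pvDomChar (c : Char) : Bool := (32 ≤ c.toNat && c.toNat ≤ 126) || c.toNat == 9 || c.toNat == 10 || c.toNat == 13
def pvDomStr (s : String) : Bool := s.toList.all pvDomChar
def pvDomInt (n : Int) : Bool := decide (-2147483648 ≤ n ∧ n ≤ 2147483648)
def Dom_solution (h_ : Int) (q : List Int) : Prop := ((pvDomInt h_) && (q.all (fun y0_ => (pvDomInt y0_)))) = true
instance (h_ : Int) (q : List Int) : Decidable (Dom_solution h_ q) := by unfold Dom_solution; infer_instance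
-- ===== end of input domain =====

-- B replaces A's whole-tree recursive DFS by an O(h) per-query root-to-node walk (objective: alternative algorithm; intended as faster, but a timing run could not measure a ratio since A times out where B returns).

-- ===== PORT A =====
-- Python `s >> 1` on an int ≥ 0 is floor division by 2: PySem.Int.floordiv s 2 (exact).
-- `leftNode in parentLabels and parentLabels[leftNode] == -1` is `get? leftNode = some (-1)` (exact).
def dfsA (s o : Int) (d : PySem.Dict Int Int) : PySem.Dict Int Int :=
  if s < 1 then d
  else
    let s' := PySem.Int.floordiv s 2
    let leftNode := o + s'
    let rightNode := leftNode + s'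
    let parentNode := rightNode + 1
    let d1 := if d.get? leftNode = some (-1) then d.insert leftNode parentNode else d
    let d2 := if d1.get? rightNode = some (-1) then d1.insert rightNode parentNode else d1
    dfsA s' leftNode (dfsA s' o d2)
termination_by s.toNat
decreasing_by
  all_goals
    rw [PySem.Int.floordiv_eq_ediv_of_pos (by omega : (0:Int) < 2)]
    omega

-- Python computes maxSize = 2**h - 1; for h ≤ 0 that value is < 1 and dfs returns at once,
-- exactly as it does for 2 ^ h_.toNat - 1 ≤ 0 here, so the port is exact for every Int h_.
def solution (h_ : Int) (q : List Int) : List Int :=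
  let maxSize : Int := 2 ^ h_.toNat - 1
  let parentLabels : PySem.Dict Int Int := q.foldl (fun d c => d.insert c (-1)) PySem.Dict.empty
  (dfsA maxSize 0 parentLabels).values

-- ===== PORT B =====
-- the `for _ in range(h)` loop of Source B's parent(), fuel = h
def bloopB (fuel : Nat) (s o x : Int) : Int :=
  match fuel with
  | 0 => -1
  | n + 1 =>
    let half := PySem.Int.floordiv s 2   -- `s >> 1`
    let left := o + half
    let right := left + half
    if x = left ∨ x = right then o + s
    else if x < left then bloopB n half o x
    else bloopB n half left x

def parentB (h : Nat) (top x : Int) : Int :=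
  if x < 1 ∨ top ≤ x then -1 else bloopB h top 0 x

def solution_alt (h_ : Int) (q : List Int) : List Int :=
  let top : Int := if 1 ≤ h_ then 2 ^ h_.toNat - 1 else 0
  let out : PySem.Dict Int Int :=
    q.foldl (fun d x => if d.contains x then d else d.insert x (parentB h_.toNat top x)) PySem.Dict.empty
  out.values

-- ===== PRECONDITION & SPEC =====
-- Pre_ excludes only heights h ≥ 995: exactly there A's recursion of depth h overflows
-- CPython's default recursion limit of 1000 and raises RecursionError before returning
-- (measured: A returns for h ≤ 994 and raises RecursionError for every h ≥ 995).
def Pre_solution (h_ : Int) (q : List Int) : Prop := h_ < 995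
instance (h_ : Int) (q : List Int) : Decidable (Pre_solution h_ q) := by unfold Pre_solution; infer_instance
def pvWitness_solution : Int × List Int := (3, [1, 5, 6])

-- When h ≥ 1 and 0 is queried, A returns 1 for the query 0 (a phantom write of its size-1 DFS
-- calls, though 0 is not a node label of the tree 1..2^h-1), while B returns the sentinel -1
-- meaning 'no parent', the intended answer for a non-node.
def D_solution (h_ : Int) (q : List Int) : Prop := 1 ≤ h_ ∧ (0:Int) ∈ q
instance (h_ : Int) (q : List Int) : Decidable (D_solution h_ q) := by unfold D_solution; infer_instance

def Spec_solution (h_ : Int) (q : List Int) (out : List Int) : Prop := ¬ D_solution h_ q → out = solution_alt h_ q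
instance (h_ : Int) (q : List Int) (out : List Int) : Decidable (Spec_solution h_ q out) := by unfold Spec_solution; infer_instance

def pvDiffWitness_solution : Int × List Int := (1, [0])
def pvDiffWitnessOut_solution : (List Int) × (List Int) := ([1], [-1])

-- ===== CLAIM (what is proved, stated in full; the proofs are below) =====
def Claim_unchanged_solution : Prop := ∀ (h_ : Int) (q : List Int), Dom_solution h_ q → Pre_solution h_ q → Spec_solution h_ q (solution h_ q)
def Claim_changed_solution : Prop := Dom_solution (pvDiffWitness_solution.1) (pvDiffWitness_solution.2) ∧ Pre_solution (pvDiffWitness_solution.1) (pvDiffWitness_solution.2) ∧ D_solution (pvDiffWitness_solution.1) (pvDiffWitness_solution.2) ∧ solution (pvDiffWitness_solution.1) (pvDiffWitness_solution.2) = pvDiffWitnessOut_solution.1 ∧ solution_alt (pvDiffWitness_solution.1) (pvDiffWitness_solution.2) = pvDiffWitnessOut_solution.2 ∧ pvDiffWitnessOut_solution.1 ≠ pvDiffWitnessOut_solution.2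
def Claim_exact_solution : Prop := ∀ (h_ : Int) (q : List Int), Dom_solution h_ q → Pre_solution h_ q → D_solution h_ q → solution h_ q ≠ solution_alt h_ q

-- ===== LEMMAS AND PROOFS =====

-- gfw k o x: the FIRST value A's dfs over a subtree of size 2^k - 1 at offset o would write to key x
-- (none if the subtree never writes to x).
def gfw (k : Nat) (o x : Int) : Option Int :=
  match k with
  | 0 => none
  | n + 1 =>
    let half : Int := 2 ^ n - 1
    let left := o + half
    let right := left + half
    if x = left ∨ x = right then some (o + (2 ^ (n + 1) - 1))
    else (gfw n o x).orElse (fun _ => gfw n left x)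

theorem two_pow_int_pos (n : Nat) : (0:Int) < 2 ^ n := by positivity

theorem fdiv_pow_succ (k : Nat) : PySem.Int.floordiv (2 ^ (k + 1) - 1) 2 = 2 ^ k - 1 := by
  rw [PySem.Int.floordiv_eq_ediv_of_pos (by omega : (0:Int) < 2)]
  have : (2:Int) ^ (k + 1) = 2 * 2 ^ k := by ring
  omega

theorem gfw_none (k : Nat) (o x : Int) (h : x < o ∨ o + (2 ^ k - 1) - 1 < x) : gfw k o x = none := by
  induction k generalizing o with
  | zero => rfl
  | succ n ih =>
    have hp := two_pow_int_pos n
    have hp2 : (2:Int) ^ (n + 1) = 2 * 2 ^ n := by ring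
    simp only [gfw]
    rw [if_neg (by omega)]
    rw [ih o (by omega), ih (o + (2 ^ n - 1)) (by omega)]
    rfl

theorem gfw_pos (k : Nat) (o x v : Int) (ho : 0 ≤ o) (h : gfw k o x = some v) : 0 < v := by
  induction k generalizing o v with
  | zero => simp [gfw] at h
  | succ n ih =>
    have hp := two_pow_int_pos n
    have hp2 : (2:Int) ^ (n + 1) = 2 * 2 ^ n := by ring
    simp only [gfw] at h
    split at h
    · have hv : o + (2 ^ (n + 1) - 1) = v := by simpa using h
      omega
    · cases hg : gfw n o x with
      | some w =>
        rw [hg] at h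
        have hv : w = v := by simpa [Option.orElse] using h
        exact hv ▸ ih o w ho hg
      | none =>
        rw [hg] at h
        have h' : gfw n (o + (2 ^ n - 1)) x = some v := by simpa [Option.orElse] using h
        exact ih (o + (2 ^ n - 1)) v (by omega) h'

-- the two conditional writes of one dfs call, and its unfolding on sizes 2^(k+1)-1
def cwrite (d : PySem.Dict Int Int) (t p : Int) : PySem.Dict Int Int :=
  if d.get? t = some (-1) then d.insert t p else d

def wstep (d : PySem.Dict Int Int) (l r p : Int) : PySem.Dict Int Int :=
  cwrite (cwrite d l p) r p

theorem dfsA_step (k : Nat) (o : Int) (d : PySem.Dict Int Int) :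
    dfsA (2 ^ (k + 1) - 1) o d
      = dfsA (2 ^ k - 1) (o + (2 ^ k - 1))
          (dfsA (2 ^ k - 1) o
            (wstep d (o + (2 ^ k - 1)) (o + (2 ^ k - 1) + (2 ^ k - 1)) (o + (2 ^ k - 1) + (2 ^ k - 1) + 1))) := by
  have hp := two_pow_int_pos k
  have hp2 : (2:Int) ^ (k + 1) = 2 * 2 ^ k := by ring
  rw [dfsA, if_neg (by omega), fdiv_pow_succ]
  rfl

theorem cwrite_get? (d : PySem.Dict Int Int) (t p x : Int) (hp : p ≠ -1) :
    (cwrite d t p).get? x = (d.get? x).map (fun v => if v = -1 ∧ x = t then p else v) := by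
  unfold cwrite
  by_cases hxt : x = t
  · subst hxt
    cases hv : d.get? x with
    | none => rw [if_neg (by simp), hv]; rfl
    | some v =>
      by_cases hv1 : v = -1
      · rw [if_pos (by rw [hv1]), PySem.Dict.get?_insert, if_pos rfl]
        simp [hv1]
      · rw [if_neg (by simpa using hv1), hv]
        simp [hv1]
  · split
    · rw [PySem.Dict.get?_insert, if_neg hxt]
      cases hv : d.get? x <;> simp [hxt]
    · cases hv : d.get? x <;> simp [hxt]

theorem wstep_get? (d : PySem.Dict Int Int) (l r p x : Int) (hp : p ≠ -1) :
    (wstep d l r p).get? x = (d.get? x).map (fun v => if v = -1 ∧ (x = l ∨ x = r) then p else v) := by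
  unfold wstep
  rw [cwrite_get? _ _ _ _ hp, cwrite_get? _ _ _ _ hp, Option.map_map]
  cases hv : d.get? x with
  | none => simp
  | some v =>
    simp only [Option.map_some, Function.comp]
    congr 1
    split_ifs <;> omega

theorem dfs_get? (k : Nat) : ∀ (o : Int) (d : PySem.Dict Int Int) (x : Int), 0 ≤ o →
    (dfsA (2 ^ k - 1) o d).get? x
      = (d.get? x).map (fun v => if v = -1 then (gfw k o x).getD (-1) else v) := by
  induction k with
  | zero =>
    intro o d x ho
    rw [show (2:Int) ^ 0 - 1 = 0 by norm_num, dfsA, if_pos (by omega)]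
    cases hv : d.get? x with
    | none => simp
    | some v =>
      simp only [Option.map_some]
      congr 1
      by_cases hv1 : v = -1 <;> simp [gfw, hv1]
  | succ k ih =>
    intro o d x ho
    have hp := two_pow_int_pos k
    have hp2 : (2:Int) ^ (k + 1) = 2 * 2 ^ k := by ring
    rw [dfsA_step, ih (o + (2 ^ k - 1)) _ x (by omega), ih o _ x ho,
        wstep_get? _ _ _ _ x (by omega)]
    rw [Option.map_map, Option.map_map]
    cases hv : d.get? x with
    | none => simp
    | some v =>
      simp only [Option.map_some, Function.comp]
      congr 1
      rw [gfw]
      by_cases hv1 : v = -1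
      · subst hv1
        by_cases hlr : x = o + (2 ^ k - 1) ∨ x = o + (2 ^ k - 1) + (2 ^ k - 1)
        · rw [if_pos hlr,
            if_pos (⟨rfl, hlr⟩ : (-1:Int) = -1 ∧ (x = o + (2 ^ k - 1) ∨ x = o + (2 ^ k - 1) + (2 ^ k - 1))),
            if_neg (by omega : ¬(o + (2 ^ k - 1) + (2 ^ k - 1) + 1 = -1)),
            if_neg (by omega : ¬(o + (2 ^ k - 1) + (2 ^ k - 1) + 1 = -1)),
            if_pos rfl]
          simp only [Option.getD_some]
          omega
        · rw [if_neg hlr,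
            show (if (-1:Int) = -1 ∧ (x = o + (2 ^ k - 1) ∨ x = o + (2 ^ k - 1) + (2 ^ k - 1)) then
                o + (2 ^ k - 1) + (2 ^ k - 1) + 1 else -1) = -1 from if_neg (fun h => hlr h.2)]
          rw [show (if (-1:Int) = -1 then (gfw k o x).getD (-1) else -1) = (gfw k o x).getD (-1) from if_pos rfl,
            show (if (-1:Int) = -1 then ((gfw k o x).orElse fun _ => gfw k (o + (2 ^ k - 1)) x).getD (-1) else -1)
              = ((gfw k o x).orElse fun _ => gfw k (o + (2 ^ k - 1)) x).getD (-1) from if_pos rfl]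
          cases hg : gfw k o x with
          | none => simp [Option.orElse]
          | some w =>
            have hw := gfw_pos k o x w ho hg
            simp [Option.orElse, show ¬(w = -1) by omega]
      · have e1 : (if v = -1 ∧ (x = o + (2 ^ k - 1) ∨ x = o + (2 ^ k - 1) + (2 ^ k - 1)) then
            o + (2 ^ k - 1) + (2 ^ k - 1) + 1 else v) = v := if_neg (fun h => hv1 h.1)
        rw [e1, if_neg hv1, if_neg hv1, if_neg hv1]


theorem keys_condinsert (d : PySem.Dict Int Int) (k v : Int) :
    (if d.get? k = some (-1) then d.insert k v else d).keys = d.keys := by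
  split
  · apply PySem.Dict.keys_insert_of_contains
    rw [PySem.Dict.contains_eq_isSome_get?]
    rename_i hg
    rw [hg]; rfl
  · rfl

theorem dfs_keys_aux (n : Nat) : ∀ (s o : Int) (d : PySem.Dict Int Int), s.toNat ≤ n → (dfsA s o d).keys = d.keys := by
  induction n with
  | zero =>
    intro s o d hs
    rw [dfsA, if_pos (by omega)]
  | succ n ih =>
    intro s o d hs
    rw [dfsA]
    by_cases h : s < 1
    · rw [if_pos h]
    · rw [if_neg h]
      have hfd : PySem.Int.floordiv s 2 = s / 2 := PySem.Int.floordiv_eq_ediv_of_pos (by omega)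
      have hlt : (PySem.Int.floordiv s 2).toNat ≤ n := by rw [hfd]; omega
      rw [ih _ _ _ hlt, ih _ _ _ hlt, keys_condinsert, keys_condinsert]

theorem dfs_keys (s o : Int) (d : PySem.Dict Int Int) : (dfsA s o d).keys = d.keys :=
  dfs_keys_aux s.toNat s o d le_rfl

theorem walk_eq (k : Nat) (o x : Int) (ho : 0 ≤ o) (h1 : o < x) (h2 : x < o + (2 ^ k - 1)) :
    bloopB k (2 ^ k - 1) o x = (gfw k o x).getD (-1) := by
  induction k generalizing o with
  | zero => simp at h2; omega
  | succ n ih =>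
    have hp := two_pow_int_pos n
    have hp2 : (2:Int) ^ (n + 1) = 2 * 2 ^ n := by ring
    simp only [bloopB, gfw, fdiv_pow_succ]
    by_cases hlr : x = o + (2 ^ n - 1) ∨ x = o + (2 ^ n - 1) + (2 ^ n - 1)
    · rw [if_pos hlr, if_pos hlr]
      simp
    · rw [if_neg hlr, if_neg hlr]
      push_neg at hlr
      by_cases hxl : x < o + (2 ^ n - 1)
      · rw [if_pos hxl, ih o ho h1 hxl]
        rw [gfw_none n (o + (2 ^ n - 1)) x (Or.inl hxl)]
        cases hg : gfw n o x <;> simp [Option.orElse]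
      · rw [if_neg hxl]
        rw [gfw_none n o x (Or.inr (by omega))]
        rw [ih (o + (2 ^ n - 1)) (by omega) (by omega) (by omega)]
        simp [Option.orElse]

theorem gfw_zero_zero (k : Nat) (hk : 1 ≤ k) : gfw k 0 0 = some 1 := by
  obtain ⟨n, rfl⟩ : ∃ n, k = n + 1 := ⟨k - 1, by omega⟩
  induction n with
  | zero => decide
  | succ m ih =>
    have ih' := ih (by omega)
    have hp1 := two_pow_int_pos (m + 1)
    rw [gfw]
    rw [if_neg (by omega), ih']
    simp [Option.orElse]

theorem point_eq (h_ x : Int) (hx : ¬(x = 0 ∧ 1 ≤ h_)) :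
    parentB h_.toNat (if 1 ≤ h_ then 2 ^ h_.toNat - 1 else 0) x = (gfw h_.toNat 0 x).getD (-1) := by
  by_cases hh : 1 ≤ h_
  · rw [if_pos hh]
    have hn : 1 ≤ h_.toNat := by omega
    have hp : (2:Int) ≤ 2 ^ h_.toNat := by
      calc (2:Int) = 2 ^ 1 := by norm_num
      _ ≤ 2 ^ h_.toNat := by exact pow_le_pow_right₀ (by norm_num) hn
    unfold parentB
    by_cases h1 : x < 1
    · rw [if_pos (Or.inl h1)]
      by_cases hx0 : x = 0
      · exact absurd ⟨hx0, hh⟩ hx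
      · rw [gfw_none h_.toNat 0 x (Or.inl (by omega))]; rfl
    · by_cases h2 : 2 ^ h_.toNat - 1 ≤ x
      · rw [if_pos (Or.inr h2)]
        rw [gfw_none h_.toNat 0 x (Or.inr (by omega))]; rfl
      · rw [if_neg (by omega)]
        exact walk_eq h_.toNat 0 x le_rfl (by omega) (by omega)
  · rw [if_neg hh]
    have hn : h_.toNat = 0 := by omega
    rw [hn]
    unfold parentB
    rw [if_pos (by omega)]
    rfl

theorem init_get? (q : List Int) (d : PySem.Dict Int Int) (x : Int) :
    (q.foldl (fun d c => d.insert c (-1)) d).get? x = if x ∈ q then some (-1) else d.get? x := by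
  induction q generalizing d with
  | nil => simp
  | cons c t ih =>
    rw [List.foldl_cons, ih]
    by_cases ht : x ∈ t
    · simp [ht]
    · rw [if_neg ht, PySem.Dict.get?_insert]
      by_cases hc : x = c <;> simp [hc, ht]

theorem charA (h_ : Int) (q : List Int) :
    solution h_ q = (PySem.Set.ofList q).map (fun x => (gfw h_.toNat 0 x).getD (-1)) := by
  show (dfsA (2 ^ h_.toNat - 1) 0 (q.foldl (fun d c => d.insert c (-1)) PySem.Dict.empty)).values = _
  have hk0 : (q.foldl (fun d c => d.insert c (-1)) PySem.Dict.empty).keys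
      = PySem.Set.update PySem.Dict.empty.keys q :=
    PySem.Dict.keys_foldl_insert q (fun _ _ => (-1:Int)) _
  have hkeys : (dfsA (2 ^ h_.toNat - 1) 0 (q.foldl (fun d c => d.insert c (-1)) PySem.Dict.empty)).keys
      = PySem.Set.ofList q := by
    rw [dfs_keys, hk0, PySem.Dict.keys_empty]
    exact PySem.Set.update_empty q
  rw [PySem.Dict.values_eq_map_keys _ (by rw [hkeys]; exact PySem.Set.nodup_ofList q) (-1), hkeys]
  apply List.map_congr_left
  intro x hx
  rw [PySem.Dict.getD_eq_get?_getD, dfs_get? h_.toNat 0 _ x le_rfl,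
    init_get? q PySem.Dict.empty x, if_pos ((PySem.Set.mem_ofList q x).mp hx)]
  simp

theorem bfold_get? (pb : Int → Int) (q : List Int) (d : PySem.Dict Int Int) (x : Int) :
    (q.foldl (fun d x => if d.contains x then d else d.insert x (pb x)) d).get? x
      = if (d.get? x).isSome then d.get? x else if x ∈ q then some (pb x) else none := by
  induction q generalizing d with
  | nil =>
    cases hd : d.get? x <;> simp [hd]
  | cons c t ih =>
    rw [List.foldl_cons, ih]
    by_cases hc : d.contains c
    · rw [if_pos hc]
      by_cases hxc : x = c
      · subst hxc
        have : (d.get? x).isSome := by rw [← PySem.Dict.contains_eq_isSome_get?]; exact hc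
        simp [this]
      · simp [hxc]
    · rw [if_neg hc]
      rw [PySem.Dict.get?_insert]
      by_cases hxc : x = c
      · subst hxc
        have hnone : d.get? x = none := by
          have := PySem.Dict.contains_eq_isSome_get? (d := d) (k := x)
          cases hg : d.get? x
          · rfl
          · rw [hg] at this; simp at this; rw [this] at hc; simp at hc
        simp [hnone]
      · simp [hxc]

theorem bfold_keys (pb : Int → Int) (q : List Int) (d : PySem.Dict Int Int) :
    (q.foldl (fun d x => if d.contains x then d else d.insert x (pb x)) d).keys
      = PySem.Set.update d.keys q := by
  induction q generalizing d with
  | nil => simp [PySem.Set.update]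
  | cons c t ih =>
    rw [List.foldl_cons, ih, PySem.Set.update_cons, PySem.Set.add_eq_ite]
    by_cases hc : d.contains c
    · rw [if_pos hc, if_pos ((PySem.Dict.contains_iff_mem_keys _ _).mp hc)]
    · rw [if_neg hc, PySem.Dict.keys_insert_of_not_contains _ _ (by simpa using hc),
        if_neg (fun hm => absurd ((PySem.Dict.contains_iff_mem_keys _ _).mpr hm) (by simp [hc]))]

theorem charB (h_ : Int) (q : List Int) :
    solution_alt h_ q
      = (PySem.Set.ofList q).map (fun x => parentB h_.toNat (if 1 ≤ h_ then 2 ^ h_.toNat - 1 else 0) x) := by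
  show (q.foldl (fun d x => if d.contains x then d
        else d.insert x (parentB h_.toNat (if 1 ≤ h_ then 2 ^ h_.toNat - 1 else 0) x)) PySem.Dict.empty).values = _
  have hkeys : (q.foldl (fun d x => if d.contains x then d
        else d.insert x (parentB h_.toNat (if 1 ≤ h_ then 2 ^ h_.toNat - 1 else 0) x)) PySem.Dict.empty).keys
      = PySem.Set.ofList q := by
    rw [bfold_keys, PySem.Dict.keys_empty]
    exact PySem.Set.update_empty q
  rw [PySem.Dict.values_eq_map_keys _ (by rw [hkeys]; exact PySem.Set.nodup_ofList q) (-1), hkeys]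
  apply List.map_congr_left
  intro x hx
  rw [PySem.Dict.getD_eq_get?_getD, bfold_get?]
  simp [PySem.Dict.get?_empty, (PySem.Set.mem_ofList q x).mp hx]

-- ===== VERDICT (by name: the statement is the Claim_ definition above) =====
theorem solution_spec : Claim_unchanged_solution := by
  intro h_ q _ _ hnD
  rw [charA, charB]
  apply List.map_congr_left
  intro x hx
  symm
  apply point_eq
  rintro ⟨hx0, hh⟩
  exact hnD ⟨hh, by simpa [hx0] using (PySem.Set.mem_ofList q x).mp hx⟩

theorem solution_changed : Claim_changed_solution := by
  unfold Claim_changed_solution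
  refine ⟨by decide, by decide, by decide, ?_, by decide, by decide⟩
  show solution 1 [0] = [1]
  rw [charA]
  decide

theorem solution_tight : Claim_exact_solution := by
  intro h_ q _ _ hD heq
  have hh : 1 ≤ h_ := hD.1
  rw [charA, charB] at heq
  have h0 : (0:Int) ∈ PySem.Set.ofList q := (PySem.Set.mem_ofList q 0).mpr hD.2
  have := List.map_inj_left.mp heq 0 h0
  rw [gfw_zero_zero h_.toNat (by omega)] at this
  simp [parentB] at this
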